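-- pv_equiv track=rewrite | github.com/ciscoittech/sp404mk2-sample-agent | src/agents/sample_relationship.py | _extract_root_note
-- ===== SOURCE A (Python) =====
-- def _extract_root_note(key_string: str) -> int:
--     """Extract root note as semitone number (C=0)."""
--     # Simplified key parsing - in production, use proper music theory library
--     note_map = {
--         'C': 0, 'C#': 1, 'D': 2, 'D#': 3, 'E': 4, 'F': 5,
--         'F#': 6, 'G': 7, 'G#': 8, 'A': 9, 'A#': 10, 'B': 11
--     }
--
--     # Extract just the note part
--     for note, value in note_map.items():
--         if key_string.startswith(note):
--             return value
--
--     return 0  # Default to C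
-- ===== SOURCE B (Python) =====
-- def _extract_root_note(key_string: str) -> int:
--     """Extract root note as semitone number (C=0)."""
--     # Since natural notes precede their sharps in A's dict, the first character
--     # alone decides the result; key_string[:1] is '' for the empty string -> default 0.
--     return {'C': 0, 'D': 2, 'E': 4, 'F': 5, 'G': 7, 'A': 9, 'B': 11}.get(key_string[:1], 0)
-- ===== Notes on version B (the rewrite author's own statement) =====
-- stated objective: simpler
-- what changed: Replaces the ordered prefix-scan over the 12-entry note map with a direct single-character table lookup on key_string[:1]; the sharp entries are unreachable in A because each natural note precedes its sharp.
import Mathlib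
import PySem

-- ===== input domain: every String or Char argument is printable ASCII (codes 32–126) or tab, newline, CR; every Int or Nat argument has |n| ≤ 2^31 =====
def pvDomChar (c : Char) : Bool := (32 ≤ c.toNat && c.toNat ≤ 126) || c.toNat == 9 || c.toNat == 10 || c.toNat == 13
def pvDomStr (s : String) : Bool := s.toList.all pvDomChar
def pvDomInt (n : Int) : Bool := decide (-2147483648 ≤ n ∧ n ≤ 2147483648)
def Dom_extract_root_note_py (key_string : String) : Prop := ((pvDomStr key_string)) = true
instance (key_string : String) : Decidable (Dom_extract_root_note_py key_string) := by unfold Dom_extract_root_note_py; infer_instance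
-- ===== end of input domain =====

-- B replaces A's ordered prefix scan (where sharps are unreachable) with a direct
-- single-character table lookup; objective: simpler.

-- ===== PORT A =====
-- the dict's items, in insertion order
def noteMapItems : List (String × Int) :=
  [("C", 0), ("C#", 1), ("D", 2), ("D#", 3), ("E", 4), ("F", 5),
   ("F#", 6), ("G", 7), ("G#", 8), ("A", 9), ("A#", 10), ("B", 11)]

-- 'for note, value in note_map.items(): if key_string.startswith(note): return value'
def scanNotes (items : List (String × Int)) (key_string : String) : Int :=
  match items with
  | [] => 0  -- return 0  # Default to C
  | (note, value) :: rest =>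
      if PySem.Str.startswith key_string note then value else scanNotes rest key_string

def extract_root_note_py (key_string : String) : Int :=
  scanNotes noteMapItems key_string

-- ===== PORT B =====
-- {'C':0,'D':2,'E':4,'F':5,'G':7,'A':9,'B':11}.get(key_string[:1], 0)
def extract_root_note_py_alt (key_string : String) : Int :=
  PySem.Dict.getD
    (PySem.Dict.ofList [("C", (0:Int)), ("D", 2), ("E", 4), ("F", 5), ("G", 7), ("A", 9), ("B", 11)])
    (String.ofList (PySem.List.slice key_string.toList none (some 1)))  -- key_string[:1]
    0

-- ===== PRECONDITION & SPEC =====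
def Spec_extract_root_note_py (key_string : String) (out : Int) : Prop := out = extract_root_note_py_alt key_string
instance (key_string : String) (out : Int) : Decidable (Spec_extract_root_note_py key_string out) := by unfold Spec_extract_root_note_py; infer_instance

-- ===== CLAIM (what is proved, stated in full; the proofs are below) =====
def Claim_equal_extract_root_note_py : Prop := ∀ (key_string : String), Dom_extract_root_note_py key_string → Spec_extract_root_note_py key_string (extract_root_note_py key_string)

-- ===== LEMMAS AND PROOFS =====

-- string equality against a one-character string reduces to the character lists
theorem strEq_single_char (k : String) (c : Char) : (k == String.ofList [c]) = (k.toList == [c]) := by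
  simp [String.ext_iff]

-- ===== VERDICT (by name: the statement is the Claim_ definition above) =====
theorem extract_root_note_py_spec : Claim_equal_extract_root_note_py := by
  intro s _
  unfold Spec_extract_root_note_py extract_root_note_py extract_root_note_py_alt
  simp only [scanNotes, noteMapItems, PySem.Str.startswith_eq]
  cases hl : s.toList with
  | nil => decide
  | cons c cs =>
    have hs : PySem.List.slice (c :: cs) none (some 1) = [c] := by
      simp [PySem.List.slice, PySem.List.clampIdx]
    have hD : (PySem.Dict.ofList [("C", (0:Int)), ("D", 2), ("E", 4), ("F", 5), ("G", 7), ("A", 9), ("B", 11)])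
        = PySem.Dict.mk [("C", (0:Int)), ("D", 2), ("E", 4), ("F", 5), ("G", 7), ("A", 9), ("B", 11)] := by decide
    simp only [hs, hD, PySem.Chars.startswith, PySem.Dict.getD, PySem.Dict.get?_mk_cons]
    simp only [strEq_single_char]
    by_cases h1 : c = 'C' <;> by_cases h2 : c = 'D' <;> by_cases h3 : c = 'E' <;>
      by_cases h4 : c = 'F' <;> by_cases h5 : c = 'G' <;> by_cases h6 : c = 'A' <;>
      by_cases h7 : c = 'B' <;> simp_all [List.isPrefixOf, PySem.Dict.get?]
    simp [Ne.symm h1, Ne.symm h2, Ne.symm h3, Ne.symm h4, Ne.symm h5, Ne.symm h6, Ne.symm h7]
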